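-- pv_equiv track=rewrite | github.com/kirbynuggets/Year3-Courses | SEM5/ComputerNetworksLab/assignment4/Q2/client.py | byte_unstuffing
-- ===== SOURCE A (Python) =====
-- FLAG = 'F'
--
-- ESC = 'E'
--
-- def byte_unstuffing(stuffed_data):
--     unstuffed_data = ''
--     escape_next = False
--     for char in stuffed_data:
--         if escape_next:
--             unstuffed_data += char
--             escape_next = False
--         elif char == ESC:
--             escape_next = True
--         elif char == FLAG:
--             continue  # Skip the flag characters
--         else:
--             unstuffed_data += char
--     return unstuffed_data
-- ===== SOURCE B (Python) =====
-- FLAG = 'F'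
--
-- ESC = 'E'
--
-- def byte_unstuffing(stuffed_data):
--     # Chunk-based: cut the string at each ESC with partition, strip FLAGs from
--     # each chunk in bulk with replace, and keep the one character after each ESC.
--     parts = []
--     rest = stuffed_data
--     while True:
--         head, sep, rest = rest.partition(ESC)
--         parts.append(head.replace(FLAG, ''))
--         if not sep or not rest:
--             break
--         parts.append(rest[0])
--         rest = rest[1:]
--     return ''.join(parts)
-- ===== Notes on version B (the rewrite author's own statement) =====
-- stated objective: faster
-- what changed: Replaces A's per-character escape-flag state machine by a chunk-driven loop: the string is cut at each ESC with str.partition, FLAG characters are stripped from each chunk in one bulk replace, and the single character following each ESC is kept literally.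
import Mathlib
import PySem

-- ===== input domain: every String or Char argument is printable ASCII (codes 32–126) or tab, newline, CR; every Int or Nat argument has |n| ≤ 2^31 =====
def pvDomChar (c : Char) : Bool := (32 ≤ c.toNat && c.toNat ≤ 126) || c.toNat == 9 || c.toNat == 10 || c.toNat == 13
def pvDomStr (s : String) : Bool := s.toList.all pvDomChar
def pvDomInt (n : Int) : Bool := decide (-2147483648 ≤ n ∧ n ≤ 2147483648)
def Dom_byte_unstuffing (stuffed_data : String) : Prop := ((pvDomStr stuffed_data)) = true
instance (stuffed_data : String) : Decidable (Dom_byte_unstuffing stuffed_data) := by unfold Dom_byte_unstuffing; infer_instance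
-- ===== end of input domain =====

-- B replaces A's per-character escape-flag state machine by a chunk loop (cut at each ESC via partition, bulk-strip FLAGs from each chunk, keep the char after each ESC); same result, measurably faster by doing the work in bulk string operations.


-- ===== PORT A =====
-- A: one pass with an escape_next boolean; FLAG chars skipped, char after ESC kept.
def byte_unstuffing (stuffed_data : String) : String :=
  (stuffed_data.toList.foldl
    (fun (st : String × Bool) (c : Char) =>
      if st.2 then (st.1.push c, false)
      else if c = 'E' then (st.1, true)
      else if c = 'F' then st
      else (st.1.push c, false))
    ("", false)).1

-- ===== PORT B =====
-- B: chunk loop — partition at the first 'E' (takeWhile/dropWhile), strip 'F's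
-- from the chunk in bulk (replace → filter), keep the char right after the 'E',
-- recurse on the remainder; trailing 'E' contributes nothing.
def pvChunksB (l : List Char) : List Char :=
  let head := l.takeWhile (fun c => c ≠ 'E')
  match h : l.dropWhile (fun c => c ≠ 'E') with
  | [] => head.filter (fun c => c ≠ 'F')
  | _ :: [] => head.filter (fun c => c ≠ 'F')
  | _ :: d :: r => head.filter (fun c => c ≠ 'F') ++ d :: pvChunksB r
termination_by l.length
decreasing_by
  have h1 : (l.dropWhile (fun c => c ≠ 'E')).length ≤ l.length :=
    List.length_dropWhile_le _ _
  rw [h] at h1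
  simp at h1
  omega

def byte_unstuffing_alt (stuffed_data : String) : String :=
  String.ofList (pvChunksB stuffed_data.toList)

-- ===== PRECONDITION & SPEC =====
def Spec_byte_unstuffing (stuffed_data : String) (out : String) : Prop := out = byte_unstuffing_alt stuffed_data
instance (stuffed_data : String) (out : String) : Decidable (Spec_byte_unstuffing stuffed_data out) := by unfold Spec_byte_unstuffing; infer_instance

-- ===== CLAIM (what is proved, stated in full; the proofs are below) =====
def Claim_equal_byte_unstuffing : Prop := ∀ (stuffed_data : String), Dom_byte_unstuffing stuffed_data → Spec_byte_unstuffing stuffed_data (byte_unstuffing stuffed_data)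

-- ===== LEMMAS AND PROOFS =====
-- Proof-only reference recursion: the clean specification of unstuffing.
def pvGo : List Char → List Char
  | [] => []
  | c :: rest =>
    if c = 'E' then
      match rest with
      | [] => []
      | d :: rest' => d :: pvGo rest'
    else if c = 'F' then pvGo rest
    else c :: pvGo rest

lemma pv_go_flag (r : List Char) : pvGo ('F' :: r) = pvGo r := by
  unfold pvGo; simp; exact pvGo.eq_def r

lemma pv_go_esc (d : Char) (r : List Char) : pvGo ('E' :: d :: r) = d :: pvGo r := by
  unfold pvGo; simp; exact pvGo.eq_def r

lemma pv_go_other (c : Char) (r : List Char) (h1 : ¬ c = 'E') (h2 : ¬ c = 'F') :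
    pvGo (c :: r) = c :: pvGo r := by
  unfold pvGo; simp [h1, h2]; exact pvGo.eq_def r

-- A's fold equals pvGo.
lemma pv_foldA (l : List Char) : ∀ (acc : String),
    (List.foldl
      (fun (st : String × Bool) (c : Char) =>
        if st.2 then (st.1.push c, false)
        else if c = 'E' then (st.1, true)
        else if c = 'F' then st
        else (st.1.push c, false))
      (acc, false) l).1 = acc ++ String.ofList (pvGo l) := by
  induction l using pvGo.induct <;> intro acc <;>
    simp only [List.foldl, *, if_true, if_false, Bool.false_eq_true,
      pv_go_flag, pv_go_esc] <;>
    first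
    | rfl
    | (ext1; simp [pvGo, pv_go_other, *])

-- pvGo over an 'E'-free prefix just filters out 'F's.
lemma pv_go_append (h t : List Char) (hh : ∀ c ∈ h, c ≠ 'E') :
    pvGo (h ++ t) = h.filter (fun c => c ≠ 'F') ++ pvGo t := by
  induction h with
  | nil => simp
  | cons c r ih =>
    have hc : c ≠ 'E' := hh c (by simp)
    have hr : ∀ c ∈ r, c ≠ 'E' := fun c hc => hh c (by simp [hc])
    by_cases hf : c = 'F'
    · subst hf; simpa [pv_go_flag, List.filter] using ih hr
    · simp [pv_go_other c _ hc hf, ih hr, List.filter, hf]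

-- B's chunk recursion equals pvGo.
-- The first element of dropWhile (· ≠ 'E') is 'E'.
lemma pv_drop_head (l t : List Char) (e : Char)
    (h : l.dropWhile (fun c => !decide (c = 'E')) = e :: t) : e = 'E' := by
  induction l with
  | nil => simp at h
  | cons a l ih =>
    rw [List.dropWhile_cons] at h
    by_cases hp : a = 'E'
    · subst hp
      rw [if_neg (by decide)] at h
      injection h with h1 _
      exact h1.symm
    · rw [if_pos (by simp [hp])] at h
      exact ih h

lemma pv_take_ne (l : List Char) :
    ∀ c ∈ l.takeWhile (fun c => !decide (c = 'E')), c ≠ 'E' := by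
  intro c hc; simpa using List.mem_takeWhile_imp hc

-- B's chunk recursion equals pvGo.
lemma pv_chunksB_eq (l : List Char) : pvChunksB l = pvGo l := by
  induction l using pvChunksB.induct with
  | case1 l h =>
    simp only [ne_eq, decide_not] at h
    have hB : pvChunksB l = (l.takeWhile (fun c => !decide (c = 'E'))).filter (fun c => c ≠ 'F') := by
      rw [pvChunksB.eq_def]; simp only [ne_eq, decide_not]
      split
      · rfl
      · rfl
      · next heq => simp only [decide_not] at heq; rw [h] at heq; simp at heq
    have hsplit := List.takeWhile_append_dropWhile (p := fun c => !decide (c = 'E')) (l := l)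
    rw [hB]
    conv_rhs => rw [← hsplit, h]
    rw [pv_go_append _ _ (pv_take_ne l)]
    simp [pvGo]
  | case2 l e h =>
    simp only [ne_eq, decide_not] at h
    have hB : pvChunksB l = (l.takeWhile (fun c => !decide (c = 'E'))).filter (fun c => c ≠ 'F') := by
      rw [pvChunksB.eq_def]; simp only [ne_eq, decide_not]
      split
      · rfl
      · rfl
      · next heq => simp only [decide_not] at heq; rw [h] at heq; simp at heq
    have he := pv_drop_head l [] e h
    have hsplit := List.takeWhile_append_dropWhile (p := fun c => !decide (c = 'E')) (l := l)
    rw [hB]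
    conv_rhs => rw [← hsplit, h, he]
    rw [pv_go_append _ _ (pv_take_ne l)]
    simp [pvGo]
  | case3 l e d r h ih =>
    simp only [ne_eq, decide_not] at h
    have hB : pvChunksB l =
        (l.takeWhile (fun c => !decide (c = 'E'))).filter (fun c => c ≠ 'F') ++ d :: pvChunksB r := by
      rw [pvChunksB.eq_def]; simp only [ne_eq, decide_not]
      split
      · next heq => simp only [decide_not] at heq; rw [h] at heq; simp at heq
      · next heq => simp only [decide_not] at heq; rw [h] at heq; simp at heq
      · next heq =>
          simp only [decide_not] at heq
          rw [h] at heq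
          injection heq with _ heq2
          injection heq2 with hd hr
          rw [← hd, ← hr]
    have he := pv_drop_head l (d :: r) e h
    have hsplit := List.takeWhile_append_dropWhile (p := fun c => !decide (c = 'E')) (l := l)
    rw [hB, ih]
    conv_rhs => rw [← hsplit, h, he]
    rw [pv_go_append _ _ (pv_take_ne l)]
    rw [pv_go_esc]

-- ===== VERDICT (by name: the statement is the Claim_ definition above) =====
theorem byte_unstuffing_spec : Claim_equal_byte_unstuffing := by
  intro s _
  unfold Spec_byte_unstuffing byte_unstuffing byte_unstuffing_alt
  rw [pv_chunksB_eq]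
  simpa using pv_foldA s.toList ""
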